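-- pv_equiv track=rewrite | github.com/rmk1075/APS | 2798.py | find
-- ===== SOURCE A (Python) =====
-- def find(N, M, cards, picked, count):
--     if count == 3:
--         return sum(picked)
--
--     val = 0
--     for c in cards:
--         if c not in picked and sum(picked) + c <= M:
--             picked.append(c)
--             temp = find(N, M, cards, picked, count+1)
--             picked.pop()
--             if val < temp:
--                 val = temp
--     return val
-- ===== SOURCE B (Python) =====
-- def find(N, M, cards, picked, count):
--     # Iterative best-first-free search: sort the distinct still-available card
--     # values once, then walk the take/skip tree of ascending combinations with an
--     # explicit stack (no recursion, no permutations, no per-step membership scans).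
--     s = sum(picked)
--     if count == 3:
--         return s
--     avail = sorted({c for c in cards if c not in picked})
--     n = len(avail)
--     best = 0
--     stack = [(0, s, 3 - count)]
--     while stack:
--         i, cur, k = stack.pop()
--         if k == 0:
--             if cur > best:
--                 best = cur
--         elif 0 < k <= n - i:
--             v = avail[i]
--             stack.append((i + 1, cur, k))
--             if cur + v <= M:
--                 stack.append((i + 1, cur + v, k - 1))
--     return best
-- ===== Notes on version B (the rewrite author's own statement) =====
-- stated objective: alternative
-- what changed: A recursively tries every card at every level (all orders, duplicates included, rescanning picked and re-summing it at each step); B sorts the distinct still-available values once and walks the take/skip tree of ascending combinations with an explicit stack and running sums, visiting each candidate set once. Intended as faster (the advisory a timing run read 4.19x at n=64 and A timed out where B returned) but that run could not confirm a ratio at the largest size, so no speed is claimed.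
import Mathlib
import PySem

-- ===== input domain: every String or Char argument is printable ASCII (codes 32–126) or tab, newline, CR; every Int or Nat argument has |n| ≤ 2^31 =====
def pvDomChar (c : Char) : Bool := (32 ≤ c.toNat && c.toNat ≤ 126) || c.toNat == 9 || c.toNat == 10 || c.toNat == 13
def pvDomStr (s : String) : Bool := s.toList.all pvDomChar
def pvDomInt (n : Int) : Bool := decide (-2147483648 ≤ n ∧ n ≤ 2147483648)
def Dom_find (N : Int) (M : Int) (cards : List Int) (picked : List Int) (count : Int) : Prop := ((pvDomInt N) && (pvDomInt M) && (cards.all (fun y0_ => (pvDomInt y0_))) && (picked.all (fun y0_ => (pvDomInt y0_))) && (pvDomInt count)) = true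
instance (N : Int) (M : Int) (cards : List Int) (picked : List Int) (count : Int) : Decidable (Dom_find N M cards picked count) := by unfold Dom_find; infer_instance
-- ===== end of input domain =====

-- B re-implements A's DFS over card sequences as a sort-once, stack-driven scan over ascending
-- combinations of the distinct available values. A restores `picked` (append then pop) before
-- returning, so there is no observable mutation; the equivalence is about the return value.

-- termination helpers for port A (cited in findGo's decreasing_by)
theorem pvFilterLt {α : Type} (l : List α) (p q : α → Bool)
    (himp : ∀ x, q x = true → p x = true) (c : α) (hc : c ∈ l)
    (hpc : p c = true) (hqc : q c = false) :
    (l.filter q).length < (l.filter p).length := by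
  induction l with
  | nil => cases hc
  | cons a t ih =>
    have hmono : (t.filter q).length ≤ (t.filter p).length := by
      rw [← List.countP_eq_length_filter, ← List.countP_eq_length_filter]
      exact List.countP_mono_left (fun x _ hx => himp x hx)
    rcases List.mem_cons.mp hc with rfl | hct
    · simp only [List.filter_cons, hpc, hqc]
      simpa using Nat.lt_succ_of_le hmono
    · by_cases hqa : q a = true
      · have hpa := himp a hqa
        simp only [List.filter_cons, hqa, hpa]
        simpa using ih hct
      · have hqa' : q a = false := by simpa using hqa
        simp only [List.filter_cons, hqa']
        have := ih hct
        cases hpa : p a <;> simp <;> omega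

theorem pvMeasureLt (cards picked : List Int) (c : Int) (hc : c ∈ cards) (hcp : c ∉ picked) :
    (cards.filter (fun x => !(picked ++ [c]).contains x)).length
      < (cards.filter (fun x => !picked.contains x)).length := by
  apply pvFilterLt cards (fun x => !picked.contains x) (fun x => !(picked ++ [c]).contains x)
  · intro x hx
    have hx' : x ∉ picked ++ [c] := by simpa using hx
    simpa using fun hxp => hx' (List.mem_append_left _ hxp)
  · exact hc
  · simpa using hcp
  · simp

theorem pvLenLt {α : Type} (c : α) (cs : List α) : cs.length < (c :: cs).length := by
  simp

-- ===== PORT A =====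
-- literal transliteration of A, a recursive DFS. The for-loop over `cards` is `findGo`
-- (`rest` is the part of `cards` still to be iterated, `val` the loop accumulator; the Prop
-- argument `hsub` only records that `rest` comes from `cards`, which the termination measure
-- needs). `picked.append(c)` followed by `picked.pop()` around the recursive call is the pure
-- call with `picked ++ [c]`; the recursive call inlines the callee's own `count == 3` test
-- (its first statement), which keeps the two functions out of a mutual block.
def pvMax (val temp : Int) : Int := if val < temp then temp else val

def findGo (N : Int) (M : Int) (cards : List Int) (picked : List Int) (count : Int)
    (rest : List Int) (hsub : ∀ x ∈ rest, x ∈ cards) (val : Int) : Int :=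
  match rest with
  | [] => val
  | c :: cs =>
    if h : c ∉ picked ∧ picked.sum + c ≤ M then
      findGo N M cards picked count cs (fun x hx => hsub x (List.mem_cons_of_mem _ hx))
        (pvMax val (if count + 1 = 3 then (picked ++ [c]).sum
                    else findGo N M cards (picked ++ [c]) (count + 1) cards (fun _ h => h) 0))
    else
      findGo N M cards picked count cs (fun x hx => hsub x (List.mem_cons_of_mem _ hx)) val
termination_by ((cards.filter (fun x => !picked.contains x)).length, rest.length)
decreasing_by
  · exact Prod.Lex.left _ _ (pvMeasureLt cards picked c (hsub c List.mem_cons_self) h.1)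
  · exact Prod.Lex.right _ (pvLenLt c cs)
  · exact Prod.Lex.right _ (pvLenLt c cs)

def find (N : Int) (M : Int) (cards : List Int) (picked : List Int) (count : Int) : Int :=
  if count = 3 then picked.sum
  else findGo N M cards picked count cards (fun _ h => h) 0

-- ===== PORT B =====
-- weight of a stack for B's termination (cited in bestLoop's decreasing_by)
def pvStackW : List (List Int × Int × Int) → Nat
  | [] => 0
  | (rest, _, _) :: st => 3 ^ rest.length + pvStackW st

theorem pvStackW_pop (e : List Int × Int × Int) (st : List (List Int × Int × Int)) :
    pvStackW st < pvStackW (e :: st) := by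
  obtain ⟨rest, cur, k⟩ := e
  have h1 : 0 < 3 ^ rest.length := Nat.pow_pos (by omega)
  simp only [pvStackW]
  omega

theorem pvStackW_push (c : Prop) [Decidable c] (v : Int) (r : List Int) (a b cur k : Int)
    (st : List (List Int × Int × Int)) :
    pvStackW ((if c then [(r, a, b)] else []) ++ (r, cur, k) :: st)
      < pvStackW ((v :: r, cur, k) :: st) := by
  have h1 : 0 < 3 ^ r.length := Nat.pow_pos (by omega)
  have h2 : (3:Nat) ^ (v :: r).length = 3 * 3 ^ r.length := by
    rw [List.length_cons, pow_succ]; ring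
  split <;> simp only [pvStackW, List.singleton_append, List.nil_append, h2] <;> omega

-- literal transliteration of B (Source B): the Python stack entry (i, cur, k) — i an index into the
-- fixed list `avail` that only ever grows — is represented by the suffix avail[i:] (exact:
-- avail[i] = suffix head, i+1 = suffix tail, len(avail) - i = suffix length).
def bestLoop (M : Int) (stack : List (List Int × Int × Int)) (best : Int) : Int :=
  match stack with
  | [] => best
  | (rest, cur, k) :: st =>
    if k = 0 then bestLoop M st (if cur > best then cur else best)
    else if 0 < k ∧ k ≤ (rest.length : Int) then
      match rest with
      | [] => bestLoop M st best
      | v :: r =>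
        bestLoop M ((if cur + v ≤ M then [(r, cur + v, k - 1)] else []) ++ (r, cur, k) :: st) best
    else bestLoop M st best
termination_by pvStackW stack
decreasing_by
  all_goals first
    | apply pvStackW_push
    | apply pvStackW_pop

def find_alt (N : Int) (M : Int) (cards : List Int) (picked : List Int) (count : Int) : Int :=
  let s := picked.sum
  if count = 3 then s
  else
    let avail := PySem.List.sorted
      (PySem.Set.ofList (cards.filter (fun c => !picked.contains c))) (fun x => x) false
    bestLoop M [(avail, s, 3 - count)] 0

-- ===== PRECONDITION & SPEC =====
def Spec_find (N : Int) (M : Int) (cards : List Int) (picked : List Int) (count : Int) (out : Int) : Prop := out = find_alt N M cards picked count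
instance (N : Int) (M : Int) (cards : List Int) (picked : List Int) (count : Int) (out : Int) : Decidable (Spec_find N M cards picked count out) := by unfold Spec_find; infer_instance

-- ===== CLAIM (what is proved, stated in full; the proofs are below) =====
def Claim_equal_find : Prop := ∀ (N : Int) (M : Int) (cards : List Int) (picked : List Int) (count : Int), Dom_find N M cards picked count → Spec_find N M cards picked count (find N M cards picked count)

-- ===== LEMMAS AND PROOFS =====

-- `omax b t` = the running best after offering the optional candidate t
def omax (b : Int) : Option Int → Int
  | none => b
  | some t => if t > b then t else b

def oMax2 : Option Int → Option Int → Option Int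
  | none, none => none
  | some a, none => some a
  | none, some b => some b
  | some a, some b => some (max a b)

-- value of one stack node: max (cur + sum) over sublists of `rest` of length k whose running
-- prefix sums stay ≤ M (none if there is no such sublist)
def nodeVal (M : Int) : List Int → Int → Int → Option Int
  | [], cur, k => if k = 0 then some cur else none
  | v :: r, cur, k =>
    if k = 0 then some cur
    else if 0 < k ∧ k ≤ ((v :: r).length : Int) then
      oMax2 (if cur + v ≤ M then nodeVal M r (cur + v) (k - 1) else none) (nodeVal M r cur k)
    else none

theorem nodeVal_zero (M : Int) (rest : List Int) (cur : Int) : nodeVal M rest cur 0 = some cur := by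
  cases rest <;> simp [nodeVal]

theorem nodeVal_oor (M : Int) (rest : List Int) (cur k : Int) (hk : ¬ k = 0)
    (hr : ¬ (0 < k ∧ k ≤ (rest.length : Int))) : nodeVal M rest cur k = none := by
  cases rest with
  | nil => simp [nodeVal, hk]
  | cons v r =>
    simp only [nodeVal]
    rw [if_neg hk, if_neg hr]

theorem omax_omax (b : Int) (t s : Option Int) :
    omax (omax b t) s = omax b (oMax2 t s) := by
  cases t <;> cases s <;> simp [omax, oMax2] <;> split_ifs <;> omega

theorem bestLoop_eq_foldl (M : Int) (stack : List (List Int × Int × Int)) (best : Int) :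
    bestLoop M stack best
      = stack.foldl (fun acc e => omax acc (nodeVal M e.1 e.2.1 e.2.2)) best := by
  induction stack, best using bestLoop.induct M with
  | case1 best => simp [bestLoop]
  | case2 best rest cur st ih =>
    rw [bestLoop.eq_def]
    simp only [List.foldl_cons, nodeVal_zero]
    simpa [omax] using ih
  | case3 best cur k st hk hrange ih =>
    simp at hrange; omega
  | case4 best cur k st hk v r hrange ih =>
    rw [bestLoop.eq_def]
    simp only [if_neg hk, if_pos hrange]
    simp only [dite_eq_ite] at ih
    rw [ih]
    simp only [List.foldl_cons, nodeVal]
    rw [if_neg hk, if_pos hrange]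
    split_ifs with hm
    · simp only [List.singleton_append, List.foldl_cons, omax_omax]
    · simp only [List.nil_append, List.foldl_cons]
      have hid : oMax2 none (nodeVal M r cur k) = nodeVal M r cur k := by
        cases nodeVal M r cur k <;> rfl
      rw [hid]
  | case5 best rest cur k st hk hrange ih =>
    rw [bestLoop.eq_def]
    simp only [if_neg hk, if_neg hrange]
    rw [ih, List.foldl_cons, nodeVal_oor M _ cur k hk hrange]
    cases rest <;> simp [omax]

-- running-prefix condition of B's scan
def StepOk (M : Int) : Int → List Int → Prop
  | _, [] => True
  | s, v :: r => s + v ≤ M ∧ StepOk M (s + v) r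

-- A's search paths: successive picks from `cards`, new value each time, prefix sums ≤ M
def PathP (M : Int) (cards : List Int) : List Int → List Int → Prop
  | _, [] => True
  | picked, c :: r => c ∈ cards ∧ c ∉ picked ∧ picked.sum + c ≤ M ∧ PathP M cards (picked ++ [c]) r

-- the value A's recursive call computes (find is not yet defined where findGo recurses)
def findVal (N : Int) (M : Int) (cards : List Int) (picked : List Int) (count : Int) : Int :=
  if count = 3 then picked.sum
  else findGo N M cards picked count cards (fun _ h => h) 0

theorem find_eq_findVal (N M : Int) (cards picked : List Int) (count : Int) :
    find N M cards picked count = findVal N M cards picked count := rfl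

theorem findGo_ge_val (N M : Int) (cards picked : List Int) (count : Int) :
    ∀ (rest : List Int) (hsub : ∀ x ∈ rest, x ∈ cards) (val : Int),
      val ≤ findGo N M cards picked count rest hsub val := by
  intro rest
  induction rest with
  | nil => intro hsub val; simp [findGo]
  | cons c cs ih =>
    intro hsub val
    rw [findGo]
    by_cases h : c ∉ picked ∧ picked.sum + c ≤ M
    · rw [dif_pos h]
      refine le_trans ?_ (ih (fun x hx => hsub x (List.mem_cons_of_mem _ hx)) _)
      simp only [pvMax]
      split_ifs <;> omega
    · rw [dif_neg h]
      exact ih (fun x hx => hsub x (List.mem_cons_of_mem _ hx)) val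

theorem findGo_ge_branch (N M : Int) (cards picked : List Int) (count : Int) :
    ∀ (rest : List Int) (hsub : ∀ x ∈ rest, x ∈ cards) (val : Int) (c : Int),
      c ∈ rest → c ∉ picked → picked.sum + c ≤ M →
      findVal N M cards (picked ++ [c]) (count + 1) ≤ findGo N M cards picked count rest hsub val := by
  intro rest
  induction rest with
  | nil => intro _ _ _ hc; cases hc
  | cons a cs ih =>
    intro hsub val c hc hcp hcm
    rw [findGo]
    rcases List.mem_cons.mp hc with rfl | hccs
    · rw [dif_pos ⟨hcp, hcm⟩]
      have hX : (if count + 1 = 3 then (picked ++ [c]).sum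
          else findGo N M cards (picked ++ [c]) (count + 1) cards (fun _ h => h) 0)
          = findVal N M cards (picked ++ [c]) (count + 1) := rfl
      rw [hX]
      refine le_trans ?_ (findGo_ge_val _ _ _ _ _ _ _ _)
      simp only [pvMax]
      split_ifs <;> omega
    · by_cases h : a ∉ picked ∧ picked.sum + a ≤ M
      · rw [dif_pos h]
        exact ih (fun x hx => hsub x (List.mem_cons_of_mem _ hx)) _ c hccs hcp hcm
      · rw [dif_neg h]
        exact ih (fun x hx => hsub x (List.mem_cons_of_mem _ hx)) val c hccs hcp hcm

theorem findGo_cases (N M : Int) (cards picked : List Int) (count : Int) :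
    ∀ (rest : List Int) (hsub : ∀ x ∈ rest, x ∈ cards) (val : Int),
      findGo N M cards picked count rest hsub val = val ∨
      ∃ c ∈ rest, c ∉ picked ∧ picked.sum + c ≤ M ∧
        findGo N M cards picked count rest hsub val = findVal N M cards (picked ++ [c]) (count + 1) := by
  intro rest
  induction rest with
  | nil => intro hsub val; left; simp [findGo]
  | cons a cs ih =>
    intro hsub val
    rw [findGo]
    by_cases h : a ∉ picked ∧ picked.sum + a ≤ M
    · rw [dif_pos h]
      have hX : (if count + 1 = 3 then (picked ++ [a]).sum
          else findGo N M cards (picked ++ [a]) (count + 1) cards (fun _ h => h) 0)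
          = findVal N M cards (picked ++ [a]) (count + 1) := rfl
      rw [hX]
      rcases ih (fun x hx => hsub x (List.mem_cons_of_mem _ hx))
        (pvMax val (findVal N M cards (picked ++ [a]) (count + 1))) with heq | ⟨c, hc, h1, h2, heq⟩
      · rw [heq]
        simp only [pvMax]
        split_ifs with hlt
        · exact Or.inr ⟨a, List.mem_cons_self, h.1, h.2, rfl⟩
        · exact Or.inl rfl
      · exact Or.inr ⟨c, List.mem_cons_of_mem _ hc, h1, h2, heq⟩
    · rw [dif_neg h]
      rcases ih (fun x hx => hsub x (List.mem_cons_of_mem _ hx)) val with heq | ⟨c, hc, h1, h2, heq⟩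
      · exact Or.inl heq
      · exact Or.inr ⟨c, List.mem_cons_of_mem _ hc, h1, h2, heq⟩

theorem findVal_nonneg (N M : Int) (cards picked : List Int) (count : Int) (h : count ≠ 3) :
    0 ≤ findVal N M cards picked count := by
  rw [findVal, if_neg h]
  exact findGo_ge_val _ _ _ _ _ _ _ 0

-- A1: every full path's value is a lower bound for A
theorem findVal_ge_path (N M : Int) (cards : List Int) :
    ∀ (l picked : List Int) (count : Int), PathP M cards picked l →
      count + (l.length : Int) = 3 → picked.sum + l.sum ≤ findVal N M cards picked count := by
  intro l
  induction l with
  | nil =>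
    intro picked count _ hlen
    simp only [List.length_nil, Nat.cast_zero, add_zero] at hlen
    rw [findVal, if_pos hlen]; simp
  | cons c r ih =>
    intro picked count hp hlen
    obtain ⟨hc, hcp, hcm, hp'⟩ := hp
    have hc3 : count ≠ 3 := by simp at hlen; omega
    rw [findVal, if_neg hc3]
    have h1 : (picked ++ [c]).sum + r.sum ≤ findVal N M cards (picked ++ [c]) (count + 1) := by
      apply ih _ _ hp'
      simp at hlen ⊢; omega
    have h2 := findGo_ge_branch N M cards picked count cards (fun _ h => h) 0 c hc hcp hcm
    simp only [List.sum_append, List.sum_cons, List.sum_nil, add_zero] at h1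
    simp only [List.sum_cons]
    omega

-- A2: A's value is 0 or some full path's value
theorem findVal_cases (N M : Int) (cards : List Int) :
    ∀ (k : Nat) (picked : List Int), findVal N M cards picked (3 - (k : Int)) = 0 ∨
      ∃ l, PathP M cards picked l ∧ l.length = k ∧
        findVal N M cards picked (3 - (k : Int)) = picked.sum + l.sum := by
  intro k
  induction k with
  | zero =>
    intro picked
    right
    exact ⟨[], trivial, rfl, by rw [findVal, if_pos (by norm_num)]; simp⟩
  | succ k ih =>
    intro picked
    have hne : (3 - ((k : Int) + 1)) ≠ 3 := by omega
    rw [show ((k + 1 : Nat) : Int) = (k : Int) + 1 by push_cast; ring]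
    rw [findVal, if_neg hne]
    rcases findGo_cases N M cards picked (3 - ((k : Int) + 1)) cards (fun _ h => h) 0 with
      heq | ⟨c, hc, h1, h2, heq⟩
    · exact Or.inl heq
    · rw [heq]
      have h3 : 3 - ((k : Int) + 1) + 1 = 3 - (k : Int) := by ring
      rw [h3]
      rcases ih (picked ++ [c]) with h0 | ⟨l, hp, hlen, hval⟩
      · exact Or.inl h0
      · right
        refine ⟨c :: l, ⟨hc, h1, h2, hp⟩, by simp [hlen], ?_⟩
        rw [hval]
        simp [List.sum_append]
        ring

-- A3: for count > 3 A returns 0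
theorem findVal_gt3 (N M : Int) (cards : List Int) :
    ∀ (n : Nat) (picked : List Int) (count : Int),
      (cards.filter (fun x => !picked.contains x)).length = n → 3 < count →
      findVal N M cards picked count = 0 := by
  intro n
  induction n using Nat.strong_induction_on with
  | _ n ihn =>
    intro picked count hF hc
    rw [findVal, if_neg (by omega)]
    rcases findGo_cases N M cards picked count cards (fun _ h => h) 0 with heq | ⟨c, hcm, h1, h2, heq⟩
    · exact heq
    · rw [heq]
      have hlt : (cards.filter (fun x => !(picked ++ [c]).contains x)).length < n := by
        rw [← hF]
        exact pvMeasureLt cards picked c hcm h1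
      exact ihn _ hlt (picked ++ [c]) (count + 1) rfl (by omega)

-- B1: nodeVal is none or the value of some stepwise-feasible sublist of `rest` of length k
theorem nodeVal_cases (M : Int) :
    ∀ (rest : List Int) (cur k : Int), nodeVal M rest cur k = none ∨
      ∃ l, l.Sublist rest ∧ StepOk M cur l ∧ k = (l.length : Int) ∧
        nodeVal M rest cur k = some (cur + l.sum) := by
  intro rest
  induction rest with
  | nil =>
    intro cur k
    by_cases h0 : k = 0
    · exact Or.inr ⟨[], List.Sublist.refl _, trivial, by simp [h0],
        by rw [h0, nodeVal_zero]; simp⟩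
    · exact Or.inl (by simp [nodeVal, h0])
  | cons v r ih =>
    intro cur k
    by_cases h0 : k = 0
    · exact Or.inr ⟨[], List.nil_sublist _, trivial, by simp [h0],
        by rw [h0, nodeVal_zero]; simp⟩
    · by_cases hr : 0 < k ∧ k ≤ (((v :: r).length : Int))
      · simp only [nodeVal]
        rw [if_neg h0, if_pos hr]
        have htake : (if cur + v ≤ M then nodeVal M r (cur + v) (k - 1) else none) = none ∨
            ∃ l, l.Sublist (v :: r) ∧ StepOk M cur l ∧ k = (l.length : Int) ∧
              (if cur + v ≤ M then nodeVal M r (cur + v) (k - 1) else none) = some (cur + l.sum) := by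
          by_cases hm : cur + v ≤ M
          · rw [if_pos hm]
            rcases ih (cur + v) (k - 1) with hn | ⟨l, hs, hst, hk, hv⟩
            · exact Or.inl hn
            · refine Or.inr ⟨v :: l, List.Sublist.cons₂ _ hs, ⟨hm, hst⟩, ?_, ?_⟩
              · simp only [List.length_cons]
                push_cast
                omega
              · rw [hv]
                simp only [List.sum_cons]
                congr 1
                ring
          · rw [if_neg hm]
            exact Or.inl rfl
        rcases htake with ht | ⟨l1, hs1, hst1, hk1, hv1⟩
        · rcases ih cur k with hn | ⟨l2, hs2, hst2, hk2, hv2⟩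
          · rw [ht, hn]; exact Or.inl rfl
          · rw [ht, hv2]
            exact Or.inr ⟨l2, List.Sublist.cons _ hs2, hst2, hk2, by simp [oMax2]⟩
        · rcases ih cur k with hn | ⟨l2, hs2, hst2, hk2, hv2⟩
          · rw [hv1, hn]
            exact Or.inr ⟨l1, hs1, hst1, hk1, by simp [oMax2]⟩
          · rw [hv1, hv2]
            simp only [oMax2]
            rcases max_choice (cur + l1.sum) (cur + l2.sum) with hmx | hmx <;> rw [hmx]
            · exact Or.inr ⟨l1, hs1, hst1, hk1, rfl⟩
            · exact Or.inr ⟨l2, List.Sublist.cons _ hs2, hst2, hk2, rfl⟩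
      · rw [nodeVal_oor M _ cur k h0 hr]
        exact Or.inl rfl

theorem oMax2_ge_left (a : Option Int) (t : Int) :
    ∃ t', oMax2 (some t) a = some t' ∧ t ≤ t' := by
  cases a with
  | none => exact ⟨t, rfl, le_refl _⟩
  | some b => exact ⟨max t b, rfl, le_max_left _ _⟩

theorem oMax2_ge_right (a : Option Int) (t : Int) :
    ∃ t', oMax2 a (some t) = some t' ∧ t ≤ t' := by
  cases a with
  | none => exact ⟨t, rfl, le_refl _⟩
  | some b => exact ⟨max b t, rfl, le_max_right _ _⟩

-- B2: every stepwise-feasible sublist of `rest` of length k is dominated by nodeVal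
theorem nodeVal_ge (M : Int) :
    ∀ (rest l : List Int) (cur : Int), l.Sublist rest → StepOk M cur l →
      ∃ t, nodeVal M rest cur (l.length : Int) = some t ∧ cur + l.sum ≤ t := by
  intro rest
  induction rest with
  | nil =>
    intro l cur hs _
    rw [List.sublist_nil.mp hs]
    exact ⟨cur, by simp [nodeVal], by simp⟩
  | cons v r ih =>
    intro l cur hs hst
    cases l with
    | nil => exact ⟨cur, by simpa using nodeVal_zero M (v :: r) cur, by simp⟩
    | cons x l' =>
      have hlen : ¬ (((x :: l').length : Int) = 0) := by
        simp only [List.length_cons]; push_cast; omega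
      have hrange : 0 < ((x :: l').length : Int) ∧ ((x :: l').length : Int) ≤ (((v :: r).length : Int)) := by
        have := hs.length_le
        constructor
        · simp
        · exact_mod_cast this
      simp only [nodeVal]
      rw [if_neg hlen, if_pos hrange]
      cases hs with
      | cons _ hs' =>
        rcases ih (x :: l') cur hs' hst with ⟨t, ht, hle⟩
        rw [ht]
        rcases oMax2_ge_right (if cur + v ≤ M then nodeVal M r (cur + v) (((x :: l').length : Int) - 1) else none) t with ⟨t', ht', hle'⟩
        exact ⟨t', ht', by omega⟩
      | cons₂ _ hs' =>
        obtain ⟨hm, hst'⟩ := hst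
        rcases ih l' (cur + v) hs' hst' with ⟨t, ht, hle⟩
        have hk : (((v :: l').length : Int)) - 1 = (l'.length : Int) := by
          simp only [List.length_cons]; push_cast; ring
        rw [if_pos hm, hk, ht]
        rcases oMax2_ge_left (nodeVal M r cur ((v :: l').length : Int)) t with ⟨t', ht', hle'⟩
        refine ⟨t', ht', ?_⟩
        simp only [List.sum_cons] at hle ⊢
        omega

-- StepOk as a condition on prefix sums
theorem stepOk_iff (M : Int) :
    ∀ (l : List Int) (s : Int), StepOk M s l ↔ ∀ i : Nat, i < l.length → s + (l.take (i + 1)).sum ≤ M := by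
  intro l
  induction l with
  | nil => intro s; simp [StepOk]
  | cons v r ih =>
    intro s
    constructor
    · rintro ⟨h1, h2⟩ i hi
      cases i with
      | zero => simpa using h1
      | succ j =>
        have := (ih (s + v)).mp h2 j (by simpa using hi)
        simp only [List.take_succ_cons, List.sum_cons]
        omega
    · intro h
      refine ⟨by simpa using h 0 (by simp), (ih (s + v)).mpr ?_⟩
      intro j hj
      have := h (j + 1) (by simpa using hj)
      simp only [List.take_succ_cons, List.sum_cons] at this
      omega

-- prefix sums of an orderedInsert are bounded by those of plain cons
theorem orderedInsert_take_sum_le (x : Int) :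
    ∀ (L : List Int) (i : Nat),
      ((List.orderedInsert (· ≤ ·) x L).take i).sum ≤ ((x :: L).take i).sum := by
  intro L
  induction L with
  | nil => intro i; simp [List.orderedInsert]
  | cons b L' ih =>
    intro i
    by_cases hxb : x ≤ b
    · simp [List.orderedInsert, hxb]
    · have hins : List.orderedInsert (· ≤ ·) x (b :: L') = b :: List.orderedInsert (· ≤ ·) x L' := by
        simp [List.orderedInsert, hxb]
      rw [hins]
      cases i with
      | zero => simp
      | succ j =>
        simp only [List.take_succ_cons, List.sum_cons]
        have h1 := ih j
        cases j with
        | zero => simp at h1 ⊢; omega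
        | succ j' =>
          simp only [List.take_succ_cons, List.sum_cons] at h1 ⊢
          omega

-- prefix sums of the ascending sort are bounded by the original prefix sums
theorem insertionSort_take_sum_le :
    ∀ (m : List Int) (i : Nat),
      ((List.insertionSort (· ≤ ·) m).take i).sum ≤ (m.take i).sum := by
  intro m
  induction m with
  | nil => intro i; simp
  | cons x m' ih =>
    intro i
    rw [List.insertionSort]
    refine le_trans (orderedInsert_take_sum_le x (List.insertionSort (· ≤ ·) m') i) ?_
    cases i with
    | zero => simp
    | succ j =>
      simp only [List.take_succ_cons, List.sum_cons]
      have := ih j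
      omega

theorem stepOk_sort (M s : Int) (l : List Int) (h : StepOk M s l) :
    StepOk M s (List.insertionSort (· ≤ ·) l) := by
  rw [stepOk_iff] at h ⊢
  intro i hi
  have hlen : (List.insertionSort (· ≤ ·) l).length = l.length := List.length_insertionSort _ _
  have h2 := h i (by omega)
  have hd := insertionSort_take_sum_le l (i + 1)
  omega

-- a strictly increasing list whose elements lie in a strictly increasing list is a sublist of it
theorem sublist_of_pairwise_lt :
    ∀ (v u : List Int), u.Pairwise (· < ·) → v.Pairwise (· < ·) →
      (∀ x ∈ u, x ∈ v) → u.Sublist v := by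
  intro v
  induction v with
  | nil =>
    intro u _ _ hsub
    cases u with
    | nil => exact List.Sublist.refl _
    | cons a _ => exact absurd (hsub a List.mem_cons_self) (List.not_mem_nil)
  | cons b v' ih =>
    intro u hu hv hsub
    cases u with
    | nil => exact List.nil_sublist _
    | cons a u' =>
      have hv' : v'.Pairwise (· < ·) := List.Pairwise.of_cons hv
      have hu' : u'.Pairwise (· < ·) := List.Pairwise.of_cons hu
      by_cases hab : a = b
      · subst hab
        refine List.Sublist.cons₂ _ (ih u' hu' hv' ?_)
        intro x hx
        have hax : a < x := (List.pairwise_cons.mp hu).1 x hx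
        rcases List.mem_cons.mp (hsub x (List.mem_cons_of_mem _ hx)) with rfl | h
        · omega
        · exact h
      · have hb : ∀ y ∈ v', b < y := (List.pairwise_cons.mp hv).1
        have hba : b < a := by
          rcases List.mem_cons.mp (hsub a List.mem_cons_self) with rfl | h
          · omega
          · exact hb a h
        refine List.Sublist.cons _ (ih (a :: u') hu hv' ?_)
        intro x hx
        have hbx : b < x := by
          rcases List.mem_cons.mp hx with rfl | h
          · exact hba
          · have := (List.pairwise_cons.mp hu).1 x h
            omega
        rcases List.mem_cons.mp (hsub x hx) with rfl | h
        · omega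
        · exact h

-- facts about A's paths
theorem pathP_facts (M : Int) (cards : List Int) :
    ∀ (l picked : List Int), PathP M cards picked l →
      l.Nodup ∧ (∀ x ∈ l, x ∈ cards ∧ x ∉ picked) ∧ StepOk M picked.sum l := by
  intro l
  induction l with
  | nil => intro picked _; exact ⟨List.nodup_nil, by simp, trivial⟩
  | cons c r ih =>
    intro picked hp
    obtain ⟨hc, hcp, hcm, hp'⟩ := hp
    obtain ⟨hnd, hmem, hst⟩ := ih (picked ++ [c]) hp'
    have hsum : (picked ++ [c]).sum = picked.sum + c := by simp
    refine ⟨List.nodup_cons.mpr ⟨?_, hnd⟩, ?_, ⟨hcm, hsum ▸ hst⟩⟩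
    · intro hcr
      have := (hmem c hcr).2
      simp at this
    · intro x hx
      rcases List.mem_cons.mp hx with rfl | hxr
      · exact ⟨hc, hcp⟩
      · have hx2 := hmem x hxr
        refine ⟨hx2.1, fun hxp => hx2.2 ?_⟩
        simp [hxp]

theorem pathP_intro (M : Int) (cards : List Int) :
    ∀ (l picked : List Int), l.Nodup → (∀ x ∈ l, x ∈ cards ∧ x ∉ picked) →
      StepOk M picked.sum l → PathP M cards picked l := by
  intro l
  induction l with
  | nil => intro picked _ _ _; trivial
  | cons c r ih =>
    intro picked hnd hmem hst
    obtain ⟨hcm, hst'⟩ := hst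
    have hc := hmem c List.mem_cons_self
    refine ⟨hc.1, hc.2, hcm, ih (picked ++ [c]) (List.nodup_cons.mp hnd).2 ?_ ?_⟩
    · intro x hx
      have hx' := hmem x (List.mem_cons_of_mem _ hx)
      refine ⟨hx'.1, ?_⟩
      intro hmem'
      rcases List.mem_append.mp hmem' with h | h
      · exact hx'.2 h
      · simp at h
        subst h
        exact (List.nodup_cons.mp hnd).1 hx
    · have hsum : (picked ++ [c]).sum = picked.sum + c := by simp
      rw [hsum]
      exact hst'

-- membership in B's avail list
theorem mem_avail (cards picked : List Int) (x : Int) :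
    x ∈ PySem.List.sorted (PySem.Set.ofList (cards.filter (fun c => !picked.contains c)))
        (fun x => x) false ↔ x ∈ cards ∧ x ∉ picked := by
  rw [PySem.List.mem_sorted, PySem.Set.mem_ofList, List.mem_filter]
  simp

theorem omax_zero_nonneg (t : Option Int) : 0 ≤ omax 0 t := by
  cases t with
  | none => simp [omax]
  | some a => simp [omax]; split_ifs <;> omega

theorem omax_some_ge (t b : Int) : t ≤ omax b (some t) := by
  simp [omax]; split_ifs <;> omega

-- the main equivalence
theorem find_eq_find_alt (N M : Int) (cards picked : List Int) (count : Int) :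
    find N M cards picked count = find_alt N M cards picked count := by
  rw [find_eq_findVal]
  by_cases h3 : count = 3
  · subst h3
    rw [findVal, find_alt]
    simp
  · rw [find_alt]
    simp only [if_neg h3]
    set avail := PySem.List.sorted
      (PySem.Set.ofList (cards.filter (fun c => !picked.contains c))) (fun x => x) false with havail
    rw [bestLoop_eq_foldl]
    simp only [List.foldl_cons, List.foldl_nil]
    have havp : avail.Pairwise (· < ·) := by
      rw [havail]; exact PySem.List.sorted_ofList_pairwise_lt _
    by_cases hgt : 3 < count
    · rw [findVal_gt3 N M cards _ picked count rfl hgt]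
      rcases nodeVal_cases M avail picked.sum (3 - count) with hn | ⟨l, _, _, hk, hv⟩
      · rw [hn]; rfl
      · have : (0:Int) ≤ (l.length : Int) := by positivity
        omega
    · have hlt : count < 3 := by omega
      apply le_antisymm
      · have hk : count = 3 - ((3 - count).toNat : Int) := by omega
        rcases findVal_cases N M cards (3 - count).toNat picked with h0 | ⟨l, hp, hlen, hval⟩
        · rw [hk, h0]; exact omax_zero_nonneg _
        · rw [hk, hval, ← hk]
          obtain ⟨hnd, hmem, hst⟩ := pathP_facts M cards l picked hp
          set l' := List.insertionSort (· ≤ ·) l with hl'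
          have hperm : l'.Perm l := List.perm_insertionSort _ _
          have hst' : StepOk M picked.sum l' := stepOk_sort M picked.sum l hst
          have hl'pw : l'.Pairwise (· < ·) := by
            have hsle : l'.Pairwise (· ≤ ·) := List.pairwise_insertionSort _ _
            have hnd' : l'.Nodup := hperm.nodup_iff.mpr hnd
            exact (hsle.and hnd').imp (fun h => lt_of_le_of_ne h.1 h.2)
          have hsubl : l'.Sublist avail := by
            apply sublist_of_pairwise_lt avail l' hl'pw havp
            intro x hx
            rw [havail, mem_avail]
            exact hmem x (hperm.mem_iff.mp hx)
          rcases nodeVal_ge M avail l' picked.sum hsubl hst' with ⟨t, ht, hle⟩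
          have hkk : 3 - count = (l'.length : Int) := by
            rw [hperm.length_eq, hlen]; omega
          rw [hkk, ht]
          have hsum : l'.sum = l.sum := hperm.sum_eq
          have := omax_some_ge t 0
          omega
      · rcases nodeVal_cases M avail picked.sum (3 - count) with hn | ⟨l, hsl, hst, hk, hv⟩
        · rw [hn]
          exact findVal_nonneg N M cards picked count h3
        · rw [hv]
          have hmem : ∀ x ∈ l, x ∈ cards ∧ x ∉ picked := by
            intro x hx
            rw [← mem_avail cards picked x, ← havail]
            exact hsl.mem hx
          have hnd : l.Nodup := hsl.nodup (havp.imp (fun h => by omega : ∀ {a b : Int}, a < b → a ≠ b))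
          have hp : PathP M cards picked l := pathP_intro M cards l picked hnd hmem hst
          have hge := findVal_ge_path N M cards l picked count hp (by omega)
          have h0 := findVal_nonneg N M cards picked count h3
          simp only [omax]
          split_ifs <;> omega

-- ===== VERDICT (by name: the statement is the Claim_ definition above) =====
theorem find_spec : Claim_equal_find := by
  intro N M cards picked count _
  unfold Spec_find
  exact find_eq_find_alt N M cards picked count
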